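-- pv_equiv track=rewrite | github.com/JaredMontesCandela/Enfoque--Busqueda--en-Grafos | 028_BusquedaInformada_Valor de la Información.py | find_best_attribute
-- ===== SOURCE A (Python) =====
-- import math  # Importa el módulo math para operaciones matemáticas básicas
--
-- def information_value(data, attribute_index):
--     total_count = len(data)  # Obtiene el número total de instancias en el conjunto de datos
--     attribute_values = {}  # Inicializa un diccionario para contar los valores únicos del atributo
--
--     # Itera sobre cada instancia en el conjunto de datos
--     for item in data:
--         value = item[attribute_index]  # Obtiene el valor del atributo en el índice dado
--         if value not in attribute_values:
--             attribute_values[value] = 0  # Inicializa el contador para un nuevo valor del atributo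
--         attribute_values[value] += 1  # Incrementa el contador para el valor del atributo
--
--     info_value = 0.0  # Inicializa el valor de la información
--
--     # Calcula el valor de la información utilizando la fórmula de entropía
--     for value_count in attribute_values.values():
--         probability = value_count / total_count  # Calcula la probabilidad de un valor del atributo
--         info_value -= probability * math.log2(probability)  # Calcula la contribución a la entropía
--
--     return info_value  # Devuelve el valor de la información para el atributo dado
--
-- def find_best_attribute(data):
--     num_attributes = len(data[0]) - 1  # Obtiene el número de atributos en cada instancia
--     best_info_value = 0.0  # Inicializa el mejor valor de la información
--     best_attribute = -1  # Inicializa el índice del mejor atributo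
--
--     # Itera sobre todos los atributos
--     for i in range(num_attributes):
--         info_value = information_value(data, i)  # Calcula el valor de la información para el atributo actual
--
--         # Actualiza el mejor atributo si el valor de la información es mayor
--         if info_value > best_info_value:
--             best_info_value = info_value  # Actualiza el mejor valor de la información
--             best_attribute = i  # Actualiza el índice del mejor atributo
--
--     return best_attribute  # Devuelve el índice del mejor atributo
-- ===== SOURCE B (Python) =====
-- import math
--
-- def find_best_attribute(data):
--     # One pass over the data builds a counter per attribute; then one scan picks the best.
--     counts = [{} for _ in range(len(data[0]) - 1)]
--     for item in data:
--         for i, d in enumerate(counts):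
--             v = item[i]
--             d[v] = d.get(v, 0) + 1
--     n = len(data)
--     best_info_value = 0.0
--     best_attribute = -1
--     for i, d in enumerate(counts):
--         info_value = 0.0
--         for c in d.values():
--             p = c / n
--             info_value -= p * math.log2(p)
--         if info_value > best_info_value:
--             best_info_value = info_value
--             best_attribute = i
--     return best_attribute
-- ===== Notes on version B (the rewrite author's own statement) =====
-- stated objective: alternative
-- what changed: B makes a single pass over the data that builds all per-attribute value counters at once (a list of dicts updated row by row, via enumerate), instead of A's separate full rescan of the data for each attribute; the entropy scan then runs over the prebuilt counters in the same insertion order.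
import Mathlib
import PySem

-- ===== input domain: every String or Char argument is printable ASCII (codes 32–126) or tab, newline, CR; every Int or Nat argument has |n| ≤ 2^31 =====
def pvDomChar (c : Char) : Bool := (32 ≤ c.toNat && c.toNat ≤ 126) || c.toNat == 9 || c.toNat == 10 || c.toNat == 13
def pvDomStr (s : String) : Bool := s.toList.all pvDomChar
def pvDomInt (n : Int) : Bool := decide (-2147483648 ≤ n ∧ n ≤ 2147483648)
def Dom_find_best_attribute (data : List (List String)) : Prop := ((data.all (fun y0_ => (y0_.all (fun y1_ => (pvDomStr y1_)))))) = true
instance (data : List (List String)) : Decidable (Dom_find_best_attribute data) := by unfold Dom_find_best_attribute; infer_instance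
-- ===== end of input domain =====

-- B replaces A's per-attribute rescans of the data by one pass that builds all the
-- per-attribute counters together (objective: alternative; same float arithmetic in the same order).

-- ===== PORT A =====
-- literal port of information_value: count values of column attribute_index, then entropy fold
def information_value (data : List (List String)) (attribute_index : Int) : Float :=
  let total_count : Int := data.length
  let attribute_values : PySem.Dict String Int :=
    data.foldl (fun d item =>
      let value := (PySem.List.pyGet? item attribute_index).getD ""
      (if d.contains value then d else d.insert value 0).modify value 0 (· + 1)) PySem.Dict.empty
  attribute_values.values.foldl (fun info_value value_count =>
    let probability := Float.ofInt value_count / Float.ofInt total_count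
    info_value - probability * Float.log2 probability) 0.0

def find_best_attribute (data : List (List String)) : Int :=
  let num_attributes : Int := ((data.head?.getD []).length : Int) - 1
  let st := (PySem.List.pyRange 0 num_attributes 1).foldl
    (fun (st : Float × Int) i =>
      let info_value := information_value data i
      if st.1 < info_value then (info_value, i) else st) (0.0, -1)
  st.2

-- ===== PORT B =====
-- d[v] = d.get(v, 0) + 1 for v = item[i]
def pvCount (item : List String) (i : Int) (d : PySem.Dict String Int) : PySem.Dict String Int :=
  let v := (PySem.List.pyGet? item i).getD ""
  d.insert v (d.getD v 0 + 1)

-- the inner entropy loop of B: info_value -= p * log2(p) over d.values()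
def pvEntropy (n : Int) (d : PySem.Dict String Int) : Float :=
  d.values.foldl (fun info_value c =>
    let p := Float.ofInt c / Float.ofInt n
    info_value - p * Float.log2 p) 0.0

def find_best_attribute_alt (data : List (List String)) : Int :=
  let counts0 : List (PySem.Dict String Int) :=
    (PySem.List.pyRange 0 (((data.head?.getD []).length : Int) - 1) 1).map (fun _ => PySem.Dict.empty)
  let counts := data.foldl (fun counts item =>
      (PySem.List.enumerate counts).map (fun p => pvCount item p.1 p.2)) counts0
  let n : Int := data.length
  let st := (PySem.List.enumerate counts).foldl
    (fun (st : Float × Int) p =>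
      let info_value := pvEntropy n p.2
      if st.1 < info_value then (info_value, p.1) else st) (0.0, -1)
  st.2

-- ===== PRECONDITION & SPEC =====
-- Pre_ excludes exactly the inputs on which Python A raises IndexError: empty data
-- (data[0] fails) or some row shorter than num_attributes = len(data[0]) - 1 (item[i] fails).
def Pre_find_best_attribute (data : List (List String)) : Prop :=
  data ≠ [] ∧ ∀ row ∈ data, (data.head?.getD []).length - 1 ≤ row.length
instance (data : List (List String)) : Decidable (Pre_find_best_attribute data) := by
  unfold Pre_find_best_attribute; infer_instance

def pvWitness_find_best_attribute : List (List String) := [["a", "x", "y"], ["b", "x", "n"]]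

def Spec_find_best_attribute (data : List (List String)) (out : Int) : Prop :=
  out = find_best_attribute_alt data
instance (data : List (List String)) (out : Int) : Decidable (Spec_find_best_attribute data out) := by
  unfold Spec_find_best_attribute; infer_instance

-- ===== CLAIM (what is proved, stated in full; the proofs are below) =====
def Claim_equal_find_best_attribute : Prop :=
  ∀ (data : List (List String)), Dom_find_best_attribute data → Pre_find_best_attribute data →
    Spec_find_best_attribute data (find_best_attribute data)

-- ===== LEMMAS AND PROOFS =====

theorem pv_get?_of_contains_false {κ ν : Type} [BEq κ] (d : PySem.Dict κ ν) (k : κ)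
    (h : d.contains k = false) : d.get? k = none := by
  simp only [PySem.Dict.contains, List.any_eq_false] at h
  simp only [PySem.Dict.get?, List.find?_eq_none.mpr h, Option.map_none]

theorem pv_insert_pos {κ ν : Type} [BEq κ] (d : PySem.Dict κ ν) (k : κ) (v : ν)
    (h : d.contains k = true) :
    d.insert k v = PySem.Dict.mk (d.items.map (fun p => if (p.1 == k) = true then (k, v) else p)) := by
  simp [PySem.Dict.insert, h]

theorem pv_insert_neg {κ ν : Type} [BEq κ] (d : PySem.Dict κ ν) (k : κ) (v : ν)
    (h : d.contains k = false) :
    d.insert k v = PySem.Dict.mk (d.items ++ [(k, v)]) := by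
  simp [PySem.Dict.insert, h]

theorem pv_insert_insert_same {κ ν : Type} [BEq κ] [LawfulBEq κ] (d : PySem.Dict κ ν) (k : κ) (a b : ν) :
    (d.insert k a).insert k b = d.insert k b := by
  have hc2 : (d.insert k a).contains k = true := by
    simp
  by_cases hc : d.contains k = true
  · rw [pv_insert_pos _ _ _ hc2, pv_insert_pos _ _ _ hc, pv_insert_pos _ _ _ hc]
    apply PySem.Dict.ext
    simp only [List.map_map]
    apply List.map_congr_left
    intro p _
    by_cases hp : (p.1 == k) = true <;> simp [hp, Function.comp]
  · simp only [Bool.not_eq_true] at hc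
    have hall : ∀ p ∈ d.items, (p.1 == k) = false := by
      simpa [PySem.Dict.contains, List.any_eq_false, Bool.not_eq_true] using hc
    rw [pv_insert_pos (d.insert k a) k b hc2, pv_insert_neg d k a hc, pv_insert_neg d k b hc]
    apply PySem.Dict.ext
    simp only [List.map_append]
    congr 1
    · exact (List.map_congr_left (fun p hp => by simp [hall p hp])).trans (List.map_id _)
    · simp

theorem pv_dict_step (d : PySem.Dict String Int) (v : String) :
    (if d.contains v then d else d.insert v 0).modify v 0 (· + 1)
      = d.insert v (d.getD v 0 + 1) := by
  by_cases h : d.contains v = true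
  · simp [PySem.Dict.modify, h]
  · simp only [Bool.not_eq_true] at h
    have h0 : d.getD v 0 = 0 := by
      simp [PySem.Dict.getD, pv_get?_of_contains_false d v h]
    simp only [PySem.Dict.modify, h, Bool.false_eq_true, if_false,
      PySem.Dict.getD_insert, pv_insert_insert_same, h0]
    simp

-- A's counting loop for one attribute, in B's step form
def pvFoldA (data : List (List String)) (i : Int) : PySem.Dict String Int :=
  data.foldl (fun d item => pvCount item i d) PySem.Dict.empty

theorem pv_info_eq (data : List (List String)) (i : Int) :
    information_value data i = pvEntropy data.length (pvFoldA data i) := by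
  simp only [information_value, pvEntropy, pvFoldA]
  congr 2
  apply PySem.List.foldl_congr_mem
  intro d item _
  simp only [pv_dict_step, pvCount]

def pvStepB (counts : List (PySem.Dict String Int)) (item : List String) :
    List (PySem.Dict String Int) :=
  (PySem.List.enumerate counts).map (fun p => pvCount item p.1 p.2)

theorem pv_lenB (data : List (List String)) (cs : List (PySem.Dict String Int)) :
    (data.foldl pvStepB cs).length = cs.length := by
  induction data generalizing cs with
  | nil => rfl
  | cons item rest ih =>
    simp only [List.foldl_cons]
    rw [ih]
    simp [pvStepB, PySem.List.length_enumerate]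

theorem pv_getB (data : List (List String)) (cs : List (PySem.Dict String Int)) (j : Nat) :
    (data.foldl pvStepB cs)[j]? =
      cs[j]?.map (fun d => data.foldl (fun d item => pvCount item (j : Int) d) d) := by
  induction data generalizing cs with
  | nil => simp
  | cons item rest ih =>
    simp only [List.foldl_cons]
    rw [ih]
    simp only [pvStepB, List.getElem?_map, PySem.List.getElem?_enumerate, Option.map_map]
    cases cs[j]? <;> simp

theorem pv_counts0_getElem? (k : Int) (m : Nat) (hm : m < k.toNat) :
    ((PySem.List.pyRange 0 k 1).map (fun _ => (PySem.Dict.empty : PySem.Dict String Int)))[m]? =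
      some PySem.Dict.empty := by
  rw [List.getElem?_map, List.getElem?_eq_getElem]
  · simp
  · simpa [PySem.List.length_pyRange_one] using hm

theorem pv_main (data : List (List String)) :
    find_best_attribute data = find_best_attribute_alt data := by
  simp only [find_best_attribute, find_best_attribute_alt]
  have hstep : (fun (counts : List (PySem.Dict String Int)) (item : List String) =>
      (PySem.List.enumerate counts).map (fun p => pvCount item p.1 p.2)) = pvStepB := rfl
  rw [hstep]
  set k : Int := ((data.head?.getD []).length : Int) - 1 with hk
  set counts0 : List (PySem.Dict String Int) :=
    (PySem.List.pyRange 0 k 1).map (fun _ => PySem.Dict.empty) with hc0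
  set counts : List (PySem.Dict String Int) := data.foldl pvStepB counts0 with hcounts
  have hlen0 : counts0.length = k.toNat := by
    simp [hc0, PySem.List.length_pyRange_one]
  have hlen : counts.length = k.toNat := by
    rw [hcounts, pv_lenB, hlen0]
  have hget : ∀ (m : Nat), m < k.toNat →
      counts[m]? = some (pvFoldA data (m : Int)) := by
    intro m hm
    rw [hcounts, pv_getB, hc0, pv_counts0_getElem? k m hm]
    rfl
  rw [PySem.List.enumerate_eq_map_pyRange counts PySem.Dict.empty]
  rw [List.foldl_map]
  have hlenInt : PySem.List.len counts = ((k.toNat : Nat) : Int) := by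
    simp [PySem.List.len, hlen]
  rw [hlenInt]
  rw [PySem.List.pyRange_one 0 ((k.toNat : Nat) : Int), PySem.List.pyRange_one 0 k]
  simp only [Int.sub_zero, Int.toNat_natCast]
  rw [List.foldl_map, List.foldl_map]
  have hfun := PySem.List.foldl_congr_mem (List.range k.toNat)
    (fun (st : Float × Int) (m : Nat) =>
      let info_value := information_value data (0 + (m : Int))
      if st.1 < info_value then (info_value, 0 + (m : Int)) else st)
    (fun (st : Float × Int) (m : Nat) =>
      let info_value := pvEntropy (data.length : Int)
        (PySem.List.pyGetD counts (0 + (m : Int)) PySem.Dict.empty)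
      if st.1 < info_value then (info_value, 0 + (m : Int)) else st)
    (0.0, -1) ?_
  · exact congrArg Prod.snd hfun
  · intro st m hm
    rw [List.mem_range] at hm
    have hpg : PySem.List.pyGetD counts (0 + (m : Int)) PySem.Dict.empty = pvFoldA data (m : Int) := by
      rw [Int.zero_add]
      rw [PySem.List.pyGetD_eq_getElem counts PySem.Dict.empty (by positivity)
        (by rw [hlen]; exact_mod_cast hm)]
      have := hget m hm
      rw [List.getElem?_eq_getElem (by rw [hlen]; exact hm)] at this
      simpa [Int.toNat_natCast] using this
    simp only [Int.zero_add] at hpg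
    simp only [hpg, Int.zero_add, pv_info_eq]

-- ===== VERDICT (by name: the statement is the Claim_ definition above) =====
theorem find_best_attribute_spec : Claim_equal_find_best_attribute := by
  intro data _hdom _hpre
  unfold Spec_find_best_attribute
  exact pv_main data
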